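-- pv_equiv track=rewrite | github.com/talasum/dungeon-blitz-reboot | server/Commands.py | _guess_story_key_nearest
-- ===== SOURCE A (Python) =====
-- STORY_NPC_LEVEL_PREFIX = "swamproadnorth"
--
-- STORY_STATUE_RELATIVE_INDICES = {
--     27: "lubu",
--     31: "purplered",
--     32: "clintt",
--     33: "jeromelin",
-- }
--
-- STORY_STATUE_TIEBREAK = {
--     "clintt": 0,
--     "purplered": 1,
--     "lubu": 2,
--     "jeromelin": 3,
-- }
--
-- def _get_story_statue_relative_indices(level_name):
--     if not _is_story_npc_level(level_name):
--         return {}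
--     return STORY_STATUE_RELATIVE_INDICES
--
-- def _select_story_candidate(candidates):
--     if not candidates:
--         return None
--     candidates.sort(key=lambda item: (item[0], STORY_STATUE_TIEBREAK.get(item[1], 99)))
--     return candidates[0]
--
-- def _guess_story_key_nearest(npc_id, level_name, baseline_player_idx=None):
--     story_indices = _get_story_statue_relative_indices(level_name)
--     if not story_indices:
--         return None, None
--
--     npc_abs_idx = int(npc_id) >> 16
--     if baseline_player_idx is None:
--         # Deterministic default keeps guesses stable when no player index is available.
--         baseline_player_idx = npc_abs_idx - 32
--
--     candidates = []
--     for rel_idx, story_key in story_indices.items():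
--         score = abs((npc_abs_idx - rel_idx) - baseline_player_idx)
--         candidates.append((score, story_key, rel_idx))
--
--     selected = _select_story_candidate(candidates)
--     if not selected:
--         return None, baseline_player_idx
--
--     _, story_key, _ = selected
--     return story_key, baseline_player_idx
--
-- def _is_story_npc_level(level_name):
--     return (level_name or "").strip().lower().startswith(STORY_NPC_LEVEL_PREFIX)
-- ===== SOURCE B (Python) =====
-- STORY_NPC_LEVEL_PREFIX = "swamproadnorth"
--
-- STORY_STATUE_RELATIVE_INDICES = {
--     27: "lubu",
--     31: "purplered",
--     32: "clintt",
--     33: "jeromelin",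
-- }
--
-- STORY_STATUE_TIEBREAK = {
--     "clintt": 0,
--     "purplered": 1,
--     "lubu": 2,
--     "jeromelin": 3,
-- }
--
-- def _guess_story_key_nearest(npc_id, level_name, baseline_player_idx=None):
--     # Single pass: keep the running best (score, tiebreak) instead of building and sorting a list.
--     if not (level_name or "").strip().lower().startswith(STORY_NPC_LEVEL_PREFIX):
--         return None, None
--     npc_abs_idx = int(npc_id) >> 16
--     if baseline_player_idx is None:
--         baseline_player_idx = npc_abs_idx - 32
--     best_key = None
--     best_score = None
--     best_tb = None
--     for rel_idx, story_key in STORY_STATUE_RELATIVE_INDICES.items():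
--         score = abs((npc_abs_idx - rel_idx) - baseline_player_idx)
--         tb = STORY_STATUE_TIEBREAK.get(story_key, 99)
--         if best_key is None or score < best_score or (score == best_score and tb < best_tb):
--             best_key, best_score, best_tb = story_key, score, tb
--     return best_key, baseline_player_idx
-- ===== Notes on version B (the rewrite author's own statement) =====
-- stated objective: simpler
-- what changed: Inlined the three helpers into one function and replaced build-list-then-stable-sort selection with a single best-so-far pass keeping the running lowest (score, tiebreak).
import Mathlib
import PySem

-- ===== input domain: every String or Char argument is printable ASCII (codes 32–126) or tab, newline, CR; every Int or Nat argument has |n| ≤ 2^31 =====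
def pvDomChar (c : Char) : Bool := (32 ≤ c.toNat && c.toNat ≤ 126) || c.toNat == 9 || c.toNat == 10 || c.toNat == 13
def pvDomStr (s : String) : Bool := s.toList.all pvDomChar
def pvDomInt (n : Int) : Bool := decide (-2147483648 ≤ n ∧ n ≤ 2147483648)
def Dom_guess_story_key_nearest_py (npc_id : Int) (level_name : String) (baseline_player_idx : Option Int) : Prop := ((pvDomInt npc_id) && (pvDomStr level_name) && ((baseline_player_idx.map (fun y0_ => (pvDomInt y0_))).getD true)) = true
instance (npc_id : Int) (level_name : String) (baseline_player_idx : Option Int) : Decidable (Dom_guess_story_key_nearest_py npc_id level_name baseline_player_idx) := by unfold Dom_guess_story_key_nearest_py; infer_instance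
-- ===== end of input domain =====

-- B inlines A's three helpers and replaces A's build-list-then-stable-sort selection with a
-- single best-so-far pass keeping the running lowest (score, tiebreak) (objective: simpler).

-- shared module constants
def storyRelIndices : PySem.Dict Int String :=
  PySem.Dict.ofList [(27, "lubu"), (31, "purplered"), (32, "clintt"), (33, "jeromelin")]

def storyTiebreak : PySem.Dict String Int :=
  PySem.Dict.ofList [("clintt", 0), ("purplered", 1), ("lubu", 2), ("jeromelin", 3)]

-- Python abs() on int, exact
def pyAbs (x : Int) : Int := if x < 0 then -x else x

-- (level_name or "").strip().lower().startswith(prefix); 'level_name or ""' is level_name for a str argument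
def is_story_npc_level_py (level_name : String) : Bool :=
  PySem.Str.startswith (PySem.Str.lower (PySem.Str.strip level_name)) "swamproadnorth"

-- ===== PORT A =====
def get_story_statue_relative_indices_py (level_name : String) : PySem.Dict Int String :=
  if is_story_npc_level_py level_name = false then PySem.Dict.empty else storyRelIndices

def select_story_candidate_py (candidates : List (Int × String × Int)) :
    Option (Int × String × Int) :=
  if candidates = [] then none
  else
    (PySem.List.sorted2 candidates (fun t => t.1)
      (fun t => PySem.Dict.getD storyTiebreak t.2.1 99)).head?

def guess_story_key_nearest_py (npc_id : Int) (level_name : String) (baseline_player_idx : Option Int) : Option String × Option Int :=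
  let story_indices := get_story_statue_relative_indices_py level_name
  if story_indices.items = [] then (none, none)
  else
    let npc_abs_idx := PySem.Int.floordiv npc_id 65536
    let baseline := baseline_player_idx.getD (npc_abs_idx - 32)
    let candidates := story_indices.items.foldl
      (fun acc p => acc ++ [(pyAbs ((npc_abs_idx - p.1) - baseline), p.2, p.1)]) []
    match select_story_candidate_py candidates with
    | none => (none, some baseline)
    | some t => (some t.2.1, some baseline)

-- ===== PORT B =====
def guess_story_key_nearest_py_alt (npc_id : Int) (level_name : String) (baseline_player_idx : Option Int) : Option String × Option Int :=
  if is_story_npc_level_py level_name = false then (none, none)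
  else
    let npc_abs_idx := PySem.Int.floordiv npc_id 65536
    let baseline := baseline_player_idx.getD (npc_abs_idx - 32)
    let best := storyRelIndices.items.foldl
      (fun best p =>
        let score := pyAbs ((npc_abs_idx - p.1) - baseline)
        let tb := PySem.Dict.getD storyTiebreak p.2 99
        match best with
        | none => some (p.2, score, tb)
        | some (k, s, t) =>
          if score < s ∨ (score = s ∧ tb < t) then some (p.2, score, tb) else some (k, s, t))
      none
    (best.map (fun t => t.1), some baseline)

-- ===== PRECONDITION & SPEC =====
def Spec_guess_story_key_nearest_py (npc_id : Int) (level_name : String) (baseline_player_idx : Option Int) (out : Option String × Option Int) : Prop := out = guess_story_key_nearest_py_alt npc_id level_name baseline_player_idx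
instance (npc_id : Int) (level_name : String) (baseline_player_idx : Option Int) (out : Option String × Option Int) : Decidable (Spec_guess_story_key_nearest_py npc_id level_name baseline_player_idx out) := by unfold Spec_guess_story_key_nearest_py; infer_instance

-- ===== CLAIM (what is proved, stated in full; the proofs are below) =====
def Claim_equal_guess_story_key_nearest_py : Prop := ∀ (npc_id : Int) (level_name : String) (baseline_player_idx : Option Int), Dom_guess_story_key_nearest_py npc_id level_name baseline_player_idx → Spec_guess_story_key_nearest_py npc_id level_name baseline_player_idx (guess_story_key_nearest_py npc_id level_name baseline_player_idx)

-- ===== LEMMAS AND PROOFS =====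

theorem items_rel : storyRelIndices.items
    = [((27:Int), "lubu"), (31, "purplered"), (32, "clintt"), (33, "jeromelin")] := by decide

-- over the four concrete statue entries, the head of the stable (score, tiebreak) sort
-- carries the same key as the best-so-far fold
theorem core_select (n b : Int) :
    (match
      (PySem.List.sorted2
          [(pyAbs (n - 27 - b), "lubu", (27:Int)), (pyAbs (n - 31 - b), "purplered", 31),
           (pyAbs (n - 32 - b), "clintt", 32), (pyAbs (n - 33 - b), "jeromelin", 33)]
          (fun t => t.1) fun t => storyTiebreak.getD t.2.1 99).head? with
    | none => ((none : Option String), some b)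
    | some t => (some t.2.1, some b)) =
    (Option.map (fun t => t.1)
        (match
          match
            if pyAbs (n - 31 - b) < pyAbs (n - 27 - b) ∨
                  pyAbs (n - 31 - b) = pyAbs (n - 27 - b) ∧
                    storyTiebreak.getD "purplered" 99 < storyTiebreak.getD "lubu" 99 then
              some ("purplered", pyAbs (n - 31 - b), storyTiebreak.getD "purplered" 99)
            else some ("lubu", pyAbs (n - 27 - b), storyTiebreak.getD "lubu" 99) with
          | none => some ("clintt", pyAbs (n - 32 - b), storyTiebreak.getD "clintt" 99)
          | some (k, s, t) =>
            if pyAbs (n - 32 - b) < s ∨ pyAbs (n - 32 - b) = s ∧ storyTiebreak.getD "clintt" 99 < t then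
              some ("clintt", pyAbs (n - 32 - b), storyTiebreak.getD "clintt" 99)
            else some (k, s, t) with
        | none => some ("jeromelin", pyAbs (n - 33 - b), storyTiebreak.getD "jeromelin" 99)
        | some (k, s, t) =>
          if pyAbs (n - 33 - b) < s ∨ pyAbs (n - 33 - b) = s ∧ storyTiebreak.getD "jeromelin" 99 < t then
            some ("jeromelin", pyAbs (n - 33 - b), storyTiebreak.getD "jeromelin" 99)
          else some (k, s, t)),
      some b) := by
  have t1 : PySem.Dict.getD storyTiebreak "lubu" 99 = 2 := by decide
  have t2 : PySem.Dict.getD storyTiebreak "purplered" 99 = 1 := by decide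
  have t3 : PySem.Dict.getD storyTiebreak "clintt" 99 = 0 := by decide
  have t4 : PySem.Dict.getD storyTiebreak "jeromelin" 99 = 3 := by decide
  simp only [t1, t2, t3, t4, PySem.List.sorted2, PySem.List.insertBy, List.foldl, List.head?]
  generalize pyAbs (n - 27 - b) = s27
  generalize pyAbs (n - 31 - b) = s31
  generalize pyAbs (n - 32 - b) = s32
  generalize pyAbs (n - 33 - b) = s33
  norm_num
  split_ifs <;> norm_num [PySem.List.insertBy]
  all_goals (try split_ifs <;> norm_num [PySem.List.insertBy])
  all_goals (try split_ifs <;> norm_num [PySem.List.insertBy])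
  all_goals first | rfl | omega

theorem guess_story_key_nearest_py_spec : Claim_equal_guess_story_key_nearest_py := by
  intro npc_id level_name baseline_player_idx _
  unfold Spec_guess_story_key_nearest_py
  unfold guess_story_key_nearest_py guess_story_key_nearest_py_alt
    get_story_statue_relative_indices_py
  cases h : is_story_npc_level_py level_name
  · have he : (PySem.Dict.empty : PySem.Dict Int String).items = [] := by decide
    simp only [he, reduceIte]
  · simp only [items_rel, reduceIte, List.foldl, List.nil_append, List.cons_append,
      select_story_candidate_py, List.cons_ne_nil, reduceCtorEq]
    generalize PySem.Int.floordiv npc_id 65536 = n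
    generalize baseline_player_idx.getD (n - 32) = b
    exact core_select n b
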